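-- pv_equiv track=rewrite | github.com/breadcrumbbuilds/classification-image-functions | create_classification_subset.py | createUniqueClasses
-- ===== SOURCE A (Python) =====
-- def getClass(line):
--     return str(line[len(line) - 2])
--
-- def createUniqueClasses(mapFile):
--     listOfUniqueClasses = []
--     for line in mapFile:
--         classInstance = getClass(line)
--
--         # If we have already come across this class, continue
--         if classInstance in listOfUniqueClasses:
--             continue
--
--         # If not, add it to the unique classes list
--         else:
--             listOfUniqueClasses.append(classInstance)
--
--     listOfUniqueClasses.sort()
--     return listOfUniqueClasses
-- ===== SOURCE B (Python) =====
-- def getClass(line):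
--     return str(line[len(line) - 2])
--
-- def createUniqueClasses(mapFile):
--     # Collect all classes, sort once, then drop adjacent duplicates in one pass.
--     allClasses = [getClass(line) for line in mapFile]
--     allClasses.sort()
--     result = []
--     for c in allClasses:
--         if not result or result[-1] != c:
--             result.append(c)
--     return result
-- ===== Notes on version B (the rewrite author's own statement) =====
-- stated objective: alternative
-- what changed: B collects every class without membership tests, sorts the full list, then removes adjacent duplicates in one linear pass, instead of A's per-line linear membership scan followed by sorting the deduplicated list.
import Mathlib
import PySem

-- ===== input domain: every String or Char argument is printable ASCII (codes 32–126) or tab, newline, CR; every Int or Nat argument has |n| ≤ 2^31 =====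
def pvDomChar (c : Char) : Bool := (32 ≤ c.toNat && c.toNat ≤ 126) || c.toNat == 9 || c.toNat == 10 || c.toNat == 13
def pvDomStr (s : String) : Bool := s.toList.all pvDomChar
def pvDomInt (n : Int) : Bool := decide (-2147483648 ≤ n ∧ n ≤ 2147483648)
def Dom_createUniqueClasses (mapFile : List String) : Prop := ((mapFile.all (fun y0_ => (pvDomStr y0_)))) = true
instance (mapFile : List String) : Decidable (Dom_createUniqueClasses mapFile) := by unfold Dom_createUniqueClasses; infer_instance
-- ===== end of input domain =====

-- B sorts the full list of classes first and removes adjacent duplicates in one pass,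
-- instead of A's per-line membership scan followed by a final sort (alternative decomposition).


-- ===== PORT A =====
-- getClass(line) = str(line[len(line) - 2]); the "" default is never hit under Pre_ (every line nonempty)
def pvGetClassA (line : String) : String :=
  match PySem.Str.pyGet? line (PySem.Str.len line - 2) with
  | some c => String.ofList [c]
  | none => ""

def createUniqueClasses (mapFile : List String) : List String :=
  PySem.List.sorted
    (mapFile.foldl (fun acc line =>
      let classInstance := pvGetClassA line
      if acc.contains classInstance then acc else acc ++ [classInstance]) [])
    (fun x => x)

-- ===== PORT B =====
def pvGetClassB (line : String) : String :=
  match PySem.Str.pyGet? line (PySem.Str.len line - 2) with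
  | some c => String.ofList [c]
  | none => ""

def pvAdjStep (res : List String) (c : String) : List String :=
  if res = [] then res ++ [c]
  else if PySem.List.pyGetD res (-1) "" ≠ c then res ++ [c]
  else res

def createUniqueClasses_alt (mapFile : List String) : List String :=
  let allClasses := mapFile.map pvGetClassB
  let sortedClasses := PySem.List.sorted allClasses (fun x => x)
  sortedClasses.foldl pvAdjStep []

-- ===== PRECONDITION & SPEC =====
-- Pre_ excludes inputs containing an empty line, on which A's line[len(line)-2] raises IndexError.
def Pre_createUniqueClasses (mapFile : List String) : Prop := ∀ line ∈ mapFile, line ≠ ""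
instance (mapFile : List String) : Decidable (Pre_createUniqueClasses mapFile) := by unfold Pre_createUniqueClasses; infer_instance
def pvWitness_createUniqueClasses : List String := ["ab1", "cd0", "x1"]

def Spec_createUniqueClasses (mapFile : List String) (out : List String) : Prop := out = createUniqueClasses_alt mapFile
instance (mapFile : List String) (out : List String) : Decidable (Spec_createUniqueClasses mapFile out) := by unfold Spec_createUniqueClasses; infer_instance

-- ===== CLAIM (what is proved, stated in full; the proofs are below) =====
def Claim_equal_createUniqueClasses : Prop := ∀ (mapFile : List String), Dom_createUniqueClasses mapFile → Pre_createUniqueClasses mapFile → Spec_createUniqueClasses mapFile (createUniqueClasses mapFile)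

-- ===== LEMMAS AND PROOFS =====

theorem pvGetClass_eq : pvGetClassA = pvGetClassB := rfl

-- each element of a (·<·)-pairwise list is ≤ its last element
theorem pv_le_getLast (acc : List String) (h : acc.Pairwise (· < ·)) :
    ∀ a ∈ acc, ∀ hne : acc ≠ [], a ≤ acc.getLast hne := by
  induction acc with
  | nil => intro a ha; simp at ha
  | cons x t ih =>
    intro a ha hne
    rcases List.mem_cons.mp ha with rfl | hat
    · cases t with
      | nil => simp [List.getLast]
      | cons y u =>
        have hxy : a < (y :: u).getLast (by simp) := by
          have := (List.pairwise_cons.mp h).1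
          exact this _ (List.getLast_mem _)
        simpa [List.getLast_cons] using le_of_lt hxy
    · cases t with
      | nil => simp at hat
      | cons y u =>
        have := ih (List.pairwise_cons.mp h).2 a hat (by simp)
        simpa [List.getLast_cons] using this

theorem pvAdjStep_eq (res : List String) (c : String) :
    pvAdjStep res c = if res.getLast? = some c then res else res ++ [c] := by
  unfold pvAdjStep
  cases res with
  | nil => simp
  | cons x t =>
    rw [PySem.List.pyGetD_neg_one (x :: t) "" (by simp)]
    by_cases h : (x :: t).getLast (by simp) = c <;>
      simp [List.getLast?_eq_some_getLast, h]

-- the adjacent-dedup fold over a ≤-sorted suffix, with a <-sorted accumulator below it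
theorem pvAdj_invariant (l : List String) : ∀ (acc : List String),
    acc.Pairwise (· < ·) → l.Pairwise (· ≤ ·) →
    (∀ a ∈ acc, ∀ b ∈ l, a ≤ b) →
    (l.foldl pvAdjStep acc).Pairwise (· < ·) ∧
    (∀ x, x ∈ l.foldl pvAdjStep acc ↔ x ∈ acc ∨ x ∈ l) := by
  induction l with
  | nil => intro acc hacc _ _; exact ⟨hacc, by simp⟩
  | cons c t ih =>
    intro acc hacc hl hcross
    have hl' := List.pairwise_cons.mp hl
    simp only [List.foldl_cons]
    by_cases hlast : acc.getLast? = some c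
    · -- c is already the last element of acc
      have hcmem : c ∈ acc := List.mem_of_getLast? hlast
      have step : pvAdjStep acc c = acc := by rw [pvAdjStep_eq, if_pos hlast]
      rw [step]
      obtain ⟨h1, h2⟩ := ih acc hacc hl'.2
        (by intro a ha b hb; exact hcross a ha b (List.mem_cons_of_mem _ hb))
      refine ⟨h1, fun x => ?_⟩
      rw [h2]
      constructor
      · rintro (h | h) <;> simp_all
      · rintro (h | h)
        · exact Or.inl h
        · rcases List.mem_cons.mp h with rfl | h
          · exact Or.inl hcmem
          · exact Or.inr h
    · -- append c
      have step : pvAdjStep acc c = acc ++ [c] := by rw [pvAdjStep_eq, if_neg hlast]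
      rw [step]
      have hacc' : (acc ++ [c]).Pairwise (· < ·) := by
        rw [List.pairwise_append]
        refine ⟨hacc, by simp, ?_⟩
        intro a ha b hb
        rw [List.mem_singleton] at hb
        rw [hb]
        have hle : a ≤ c := hcross a ha c (by simp)
        rcases lt_or_eq_of_le hle with hlt | heq
        · exact hlt
        · -- a = c ∈ acc: then getLast acc = c would follow from a ≤ getLast ≤ c
          exfalso
          have hne : acc ≠ [] := by intro h; subst h; simp at ha
          have h1 : a ≤ acc.getLast hne := pv_le_getLast acc hacc a ha hne
          have h2 : acc.getLast hne ≤ a := hcross _ (List.getLast_mem hne) a (by simp [heq])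
          have h3 : acc.getLast hne = c := le_antisymm (heq ▸ h2) (heq ▸ h1)
          exact hlast (by rw [List.getLast?_eq_some_getLast (l := acc) hne, h3])
      have hcross' : ∀ a ∈ acc ++ [c], ∀ b ∈ t, a ≤ b := by
        intro a ha b hb
        rcases List.mem_append.mp ha with h | h
        · exact hcross a h b (List.mem_cons_of_mem _ hb)
        · rw [List.mem_singleton] at h; subst h; exact hl'.1 b hb
      obtain ⟨h1, h2⟩ := ih (acc ++ [c]) hacc' hl'.2 hcross'
      refine ⟨h1, fun x => ?_⟩
      rw [h2]
      simp [or_assoc, List.mem_cons]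

-- ===== VERDICT (by name: the statement is the Claim_ definition above) =====
theorem createUniqueClasses_spec : Claim_equal_createUniqueClasses := by
  intro mapFile _ _
  unfold Spec_createUniqueClasses createUniqueClasses createUniqueClasses_alt
  rw [← pvGetClass_eq]
  set cs := mapFile.map pvGetClassA with hcs
  -- A's fold is PySem.Set.ofList cs
  have hfold : (mapFile.foldl (fun acc line =>
      let classInstance := pvGetClassA line
      if acc.contains classInstance then acc else acc ++ [classInstance]) []) =
      PySem.Set.ofList cs := by
    rw [hcs]
    show mapFile.foldl (fun acc line => PySem.Set.add acc (pvGetClassA line))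
        PySem.Set.empty = PySem.Set.ofList (mapFile.map pvGetClassA)
    unfold PySem.Set.ofList
    exact List.foldl_map.symm
  rw [hfold]
  set s := PySem.List.sorted cs (fun x => x) with hs
  obtain ⟨hpw, hmem⟩ := pvAdj_invariant s [] (by simp) (by
      simpa using PySem.List.sorted_pairwise cs (fun x => x)) (by simp)
  show (PySem.List.sorted (PySem.Set.ofList cs) (fun x => x)) = List.foldl pvAdjStep [] s
  apply PySem.List.sorted_eq_of_perm_of_pairwise_lt
  · -- Perm: both nodup, same members
    apply (List.perm_ext_iff_of_nodup (show (List.foldl pvAdjStep [] s).Nodup from hpw.imp ne_of_lt) (PySem.Set.nodup_ofList cs)).mpr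
    intro x
    rw [hmem x, PySem.Set.mem_ofList]
    simp [hs, PySem.List.mem_sorted]
  · exact hpw
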